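-- pv_equiv track=rewrite | github.com/yuga-hashimoto/boatrace-ai | src/boatrace_ai/train/model.py | _split_rows_for_policy_selection
-- ===== SOURCE A (Python) =====
-- import math
-- from typing import Any
--
-- def _split_rows_for_policy_selection(
--     rows: list[dict[str, Any]],
-- ) -> tuple[list[dict[str, Any]], list[dict[str, Any]]]:
--     unique_dates = sorted({row["date"] for row in rows})
--     if len(unique_dates) >= 2:
--         split_index = max(1, math.floor(len(unique_dates) * 0.8))
--         fit_dates = set(unique_dates[:split_index])
--         validation_dates = set(unique_dates[split_index:])
--         if validation_dates:
--             return (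
--                 [row for row in rows if row["date"] in fit_dates],
--                 [row for row in rows if row["date"] in validation_dates],
--             )
--
--     race_keys = sorted({row["race_key"] for row in rows})
--     if len(race_keys) < 2:
--         return rows, []
--
--     split_index = max(1, math.floor(len(race_keys) * 0.8))
--     fit_keys = set(race_keys[:split_index])
--     validation_keys = set(race_keys[split_index:])
--     return (
--         [row for row in rows if row["race_key"] in fit_keys],
--         [row for row in rows if row["race_key"] in validation_keys],
--     )
-- ===== SOURCE B (Python) =====
-- import math
--
--
-- def _split_rows_for_policy_selection(rows):
--     # Group row indices by key value once (dict of value -> ascending index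
--     # list); pick the first 80% of the sorted value-groups for fit, merge the
--     # selected groups' indices back into original row order, and materialise
--     # the two halves from the indices.  Falls back from "date" to "race_key".
--     for key in ("date", "race_key"):
--         groups = {}
--         for i, row in enumerate(rows):
--             groups.setdefault(row[key], []).append(i)
--         if len(groups) < 2:
--             continue
--         order = sorted(groups)
--         cut = max(1, math.floor(len(order) * 0.8))
--         fit_idx = sorted(i for value in order[:cut] for i in groups[value])
--         validation_idx = sorted(i for value in order[cut:] for i in groups[value])
--         return [rows[i] for i in fit_idx], [rows[i] for i in validation_idx]
--     return rows, []
-- ===== Notes on version B (the rewrite author's own statement) =====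
-- stated objective: alternative
-- what changed: B replaces A's two copy-pasted blocks that build fit/validation sets and filter the rows twice by set membership with a group-by construction: one dict from key value to its ascending list of row indices, selection of whole sorted-value groups, and a merge of the chosen indices back into original row order.
-- outside the precondition, e.g. on _split_rows_for_policy_selection([{'race_key': 'a'}, {'race_key': 'b'}]): A raises KeyError, B raises KeyError
import Mathlib
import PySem

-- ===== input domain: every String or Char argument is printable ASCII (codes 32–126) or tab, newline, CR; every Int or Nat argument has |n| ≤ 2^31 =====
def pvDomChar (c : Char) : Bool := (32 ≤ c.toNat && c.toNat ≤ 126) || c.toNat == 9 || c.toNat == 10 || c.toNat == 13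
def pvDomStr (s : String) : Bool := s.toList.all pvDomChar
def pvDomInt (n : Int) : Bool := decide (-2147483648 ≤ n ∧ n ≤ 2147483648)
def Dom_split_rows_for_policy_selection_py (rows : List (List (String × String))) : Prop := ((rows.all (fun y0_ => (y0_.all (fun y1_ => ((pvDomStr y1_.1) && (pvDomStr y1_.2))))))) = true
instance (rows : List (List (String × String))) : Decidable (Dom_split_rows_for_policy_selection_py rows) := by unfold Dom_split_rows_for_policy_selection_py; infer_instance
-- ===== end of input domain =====

-- B replaces A's per-row set-membership filter passes by a group-by index: one dict from key value
-- to the ascending list of row indices, groups selected by sorted key, indices merged back into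
-- original order (objective: alternative — same cost, different construction of the output).

-- ===== PORT A =====
-- row[k] (KeyError = none, excluded by Pre_); total form via getD, used only where Pre_ guarantees the key
def pvGet (row : List (String × String)) (k : String) : String := (List.lookup k row).getD ""

-- the race_key block of A (the code both fall-through paths of A reach)
def pvRaceSplitA (rows : List (List (String × String))) : (List (List (String × String))) × (List (List (String × String))) :=
  let race_keys := PySem.List.sorted (PySem.Set.ofList (rows.map (fun r => pvGet r "race_key"))) (fun x => x) false
  if race_keys.length < 2 then (rows, [])
  else
    -- math.floor(len * 0.8) = len * 4 / 5 (exact: the float product cannot cross an integer for these magnitudes)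
    let split_index := max 1 (race_keys.length * 4 / 5)
    let fit_keys := PySem.Set.ofList (race_keys.take split_index)
    let validation_keys := PySem.Set.ofList (race_keys.drop split_index)
    (rows.filter (fun r => fit_keys.contains (pvGet r "race_key")),
     rows.filter (fun r => validation_keys.contains (pvGet r "race_key")))

def split_rows_for_policy_selection_py (rows : List (List (String × String))) : (List (List (String × String))) × (List (List (String × String))) :=
  let unique_dates := PySem.List.sorted (PySem.Set.ofList (rows.map (fun r => pvGet r "date"))) (fun x => x) false
  if 2 ≤ unique_dates.length then
    let split_index := max 1 (unique_dates.length * 4 / 5)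
    let fit_dates := PySem.Set.ofList (unique_dates.take split_index)
    let validation_dates := PySem.Set.ofList (unique_dates.drop split_index)
    if validation_dates ≠ [] then
      (rows.filter (fun r => fit_dates.contains (pvGet r "date")),
       rows.filter (fun r => validation_dates.contains (pvGet r "date")))
    else pvRaceSplitA rows
  else pvRaceSplitA rows

-- ===== PORT B =====
-- B's 'for key in ("date", "race_key")' loop: group row indices by key value, pick the first 80%
-- of the sorted value-groups, merge the chosen groups' indices back into ascending (original) order
def pvTryKeysB : List (List (String × String)) → List String → (List (List (String × String))) × (List (List (String × String)))
  | rows, [] => (rows, [])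
  | rows, k :: ks =>
    -- groups.setdefault(row[key], []).append(i)  ==  modify (row[key]) [] (· ++ [i])
    let groups := (PySem.List.enumerate rows).foldl (fun d p => d.modify (pvGet p.2 k) [] (· ++ [p.1])) PySem.Dict.empty
    if groups.size < 2 then pvTryKeysB rows ks
    else
      let order := PySem.List.sorted groups.keys (fun x => x) false
      -- math.floor(len * 0.8) = len * 4 / 5 (exact for these magnitudes)
      let cut := max 1 (order.length * 4 / 5)
      let fit_idx := PySem.List.sorted ((order.take cut).flatMap (fun v => groups.getD v [])) (fun i => i) false
      let validation_idx := PySem.List.sorted ((order.drop cut).flatMap (fun v => groups.getD v [])) (fun i => i) false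
      -- rows[i]: every stored index is in range, so the default is never used
      (fit_idx.map (fun i => PySem.List.pyGetD rows i []),
       validation_idx.map (fun i => PySem.List.pyGetD rows i []))

def split_rows_for_policy_selection_py_alt (rows : List (List (String × String))) : (List (List (String × String))) × (List (List (String × String))) :=
  pvTryKeysB rows ["date", "race_key"]

-- ===== PRECONDITION & SPEC =====
-- Pre_ excludes exactly the inputs where A raises KeyError: a row without a "date" key, or
-- (when all rows share one date value, so the race_key block runs) a row without a "race_key" key.
def Pre_split_rows_for_policy_selection_py (rows : List (List (String × String))) : Prop :=
  (∀ r ∈ rows, (List.lookup "date" r).isSome = true) ∧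
  ((∀ r1 ∈ rows, ∀ r2 ∈ rows, List.lookup "date" r1 = List.lookup "date" r2) →
    ∀ r ∈ rows, (List.lookup "race_key" r).isSome = true)
instance (rows : List (List (String × String))) : Decidable (Pre_split_rows_for_policy_selection_py rows) := by unfold Pre_split_rows_for_policy_selection_py; infer_instance

def pvWitness_split_rows_for_policy_selection_py : (List (List (String × String))) :=
  [[("date", "20240101"), ("race_key", "k1")], [("date", "20240102"), ("race_key", "k2")]]

def Spec_split_rows_for_policy_selection_py (rows : List (List (String × String))) (out : (List (List (String × String))) × (List (List (String × String)))) : Prop := out = split_rows_for_policy_selection_py_alt rows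
instance (rows : List (List (String × String))) (out : (List (List (String × String))) × (List (List (String × String)))) : Decidable (Spec_split_rows_for_policy_selection_py rows out) := by unfold Spec_split_rows_for_policy_selection_py; infer_instance

-- ===== CLAIM (what is proved, stated in full; the proofs are below) =====
def Claim_equal_split_rows_for_policy_selection_py : Prop := ∀ (rows : List (List (String × String))), Dom_split_rows_for_policy_selection_py rows → Pre_split_rows_for_policy_selection_py rows → Spec_split_rows_for_policy_selection_py rows (split_rows_for_policy_selection_py rows)

-- ===== LEMMAS AND PROOFS =====

-- two mutually exclusive tests: filtering for "either" is filtering for each, concatenated (up to order)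
theorem pvFilterOrPerm {α : Type} (p q : α → Bool) (l : List α) (hx : ∀ x, p x = true → q x = false) :
    (l.filter (fun x => p x || q x)).Perm (l.filter p ++ l.filter q) := by
  induction l with
  | nil => simp
  | cons h t ih =>
    by_cases hp : p h = true
    · simp [hp, hx h hp]
      exact ih
    · by_cases hq : q h = true
      · simp [hp, hq]
        exact (ih.cons h).trans List.perm_middle.symm
      · simp only [Bool.not_eq_true] at hp hq
        simp [hp, hq, ih]

-- grouping by distinct values: the per-value filters, concatenated, permute the "value in vs" filter
theorem pvFlatMapPerm {α : Type} (g : α → String) (l : List α) :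
    ∀ (vs : List String), vs.Nodup →
    (l.filter (fun x => decide (g x ∈ vs))).Perm (vs.flatMap (fun v => l.filter (fun x => g x == v)))
  | [], _ => by simp
  | v :: vs, hnd => by
    have hvnot : v ∉ vs := (List.nodup_cons.mp hnd).1
    have ih := pvFlatMapPerm g l vs (List.nodup_cons.mp hnd).2
    have hsplit : (l.filter (fun x => decide (g x ∈ v :: vs))).Perm
        (l.filter (fun x => g x == v) ++ l.filter (fun x => decide (g x ∈ vs))) := by
      have := pvFilterOrPerm (fun x => g x == v) (fun x => decide (g x ∈ vs)) l
        (by intro x hx; simp only [beq_iff_eq] at hx; simp [hx, hvnot])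
      refine List.Perm.trans ?_ this
      have : (fun x => decide (g x ∈ v :: vs)) = (fun x => (g x == v) || decide (g x ∈ vs)) := by
        funext x; rw [Bool.eq_iff_iff]; simp [List.mem_cons]
      rw [this]
    simpa [List.flatMap_cons] using hsplit.trans (List.Perm.append_left _ ih)

-- the groups dict of B: lookups are the per-value index filters, keys are the distinct values
theorem pvGroupsGetD (rows : List (List (String × String))) (k v : String) :
    ((PySem.List.enumerate rows).foldl (fun d p => d.modify (pvGet p.2 k) [] (· ++ [p.1])) PySem.Dict.empty).getD v []
      = ((PySem.List.enumerate rows).filter (fun p => pvGet p.2 k == v)).map (·.1) := by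
  have h := PySem.Dict.getD_foldl_modify_append
    ((PySem.List.enumerate rows).map (fun p => (pvGet p.2 k, p.1))) PySem.Dict.empty v
  rw [List.foldl_map] at h
  simpa [List.filter_map, List.map_map, Function.comp_def] using h

theorem pvGroupsKeys (rows : List (List (String × String))) (k : String) :
    ((PySem.List.enumerate rows).foldl (fun d p => d.modify (pvGet p.2 k) [] (· ++ [p.1])) PySem.Dict.empty).keys
      = PySem.Set.ofList (rows.map (fun r => pvGet r k)) := by
  have h := PySem.Dict.keys_foldl_modify_key (PySem.List.enumerate rows)
    (fun p => pvGet p.2 k) ([] : List Int) (fun _ p l => l ++ [p.1]) PySem.Dict.empty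
  rw [h]
  have hmap : (PySem.List.enumerate rows).map (fun p => pvGet p.2 k)
      = rows.map (fun r => pvGet r k) := by
    conv_rhs => rw [← PySem.List.map_snd_enumerate rows 0]
    rw [List.map_map]
    rfl
  rw [hmap]
  rfl

-- one half of B's per-key block equals the corresponding membership filter over the rows
theorem pvGroupHalf (rows : List (List (String × String))) (k : String) (S : List String)
    (hS : S.Nodup) :
    (PySem.List.sorted (S.flatMap (fun v =>
        ((PySem.List.enumerate rows).foldl (fun d p => d.modify (pvGet p.2 k) [] (· ++ [p.1])) PySem.Dict.empty).getD v []))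
      (fun i => i) false).map (fun i => PySem.List.pyGetD rows i [])
    = rows.filter (fun r => decide (pvGet r k ∈ S)) := by
  simp only [pvGroupsGetD]
  set E := ((PySem.List.enumerate rows).filter (fun p => decide (pvGet p.2 k ∈ S))).map (·.1) with hE
  have hperm : E.Perm (S.flatMap (fun v => ((PySem.List.enumerate rows).filter (fun p => pvGet p.2 k == v)).map (·.1))) := by
    have h := (pvFlatMapPerm (fun p => pvGet p.2 k) (PySem.List.enumerate rows) S hS).map (·.1)
    rw [List.map_flatMap] at h
    exact h
  have hpw : E.Pairwise (· < ·) := by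
    rw [hE, List.pairwise_map]
    exact (PySem.List.pairwise_lt_enumerate rows 0).filter _
  rw [PySem.List.sorted_eq_of_perm_of_pairwise_lt _ E (fun i => i) hperm (by simpa using hpw)]
  -- each retained index fetches its own row back
  have hfetch : E.map (fun i => PySem.List.pyGetD rows i [])
      = ((PySem.List.enumerate rows).filter (fun p => decide (pvGet p.2 k ∈ S))).map (·.2) := by
    rw [hE, List.map_map]
    apply List.map_congr_left
    intro p hp
    have hmem : p ∈ PySem.List.enumerate rows := List.mem_of_mem_filter hp
    obtain ⟨j, hj, hpj⟩ := (PySem.List.mem_enumerate_iff rows 0 p).mp hmem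
    subst hpj
    simp [PySem.List.pyGetD_natCast, List.getElem?_eq_getElem hj]
  have hsnd : ((PySem.List.enumerate rows).filter (fun p => decide (pvGet p.2 k ∈ S))).map (·.2)
      = rows.filter (fun r => decide (pvGet r k ∈ S)) := by
    conv_rhs => rw [← PySem.List.map_snd_enumerate rows 0]
    rw [List.filter_map]
    rfl
  rw [hfetch]
  exact hsnd

-- B's per-key block equals A's two set-membership filters over the rows
theorem pvSplitKey (rows : List (List (String × String))) (k : String) :
    (rows.filter (fun r => (PySem.Set.ofList ((PySem.List.sorted (PySem.Set.ofList (rows.map (fun r => pvGet r k))) (fun x => x) false).take (max 1 ((PySem.List.sorted (PySem.Set.ofList (rows.map (fun r => pvGet r k))) (fun x => x) false).length * 4 / 5)))).contains (pvGet r k)),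
     rows.filter (fun r => (PySem.Set.ofList ((PySem.List.sorted (PySem.Set.ofList (rows.map (fun r => pvGet r k))) (fun x => x) false).drop (max 1 ((PySem.List.sorted (PySem.Set.ofList (rows.map (fun r => pvGet r k))) (fun x => x) false).length * 4 / 5)))).contains (pvGet r k)))
    = ((PySem.List.sorted (((PySem.List.sorted (PySem.Set.ofList (rows.map (fun r => pvGet r k))) (fun x => x) false).take (max 1 ((PySem.List.sorted (PySem.Set.ofList (rows.map (fun r => pvGet r k))) (fun x => x) false).length * 4 / 5))).flatMap (fun v => ((PySem.List.enumerate rows).foldl (fun d p => d.modify (pvGet p.2 k) [] (· ++ [p.1])) PySem.Dict.empty).getD v [])) (fun i => i) false).map (fun i => PySem.List.pyGetD rows i []),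
       (PySem.List.sorted (((PySem.List.sorted (PySem.Set.ofList (rows.map (fun r => pvGet r k))) (fun x => x) false).drop (max 1 ((PySem.List.sorted (PySem.Set.ofList (rows.map (fun r => pvGet r k))) (fun x => x) false).length * 4 / 5))).flatMap (fun v => ((PySem.List.enumerate rows).foldl (fun d p => d.modify (pvGet p.2 k) [] (· ++ [p.1])) PySem.Dict.empty).getD v [])) (fun i => i) false).map (fun i => PySem.List.pyGetD rows i [])) := by
  set u := PySem.List.sorted (PySem.Set.ofList (rows.map (fun r => pvGet r k))) (fun x => x) false with hu
  set cut := max 1 (u.length * 4 / 5) with hcut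
  have hnd : u.Nodup := (PySem.List.sorted_ofList_pairwise_lt _).nodup
  have hAside : ∀ (S : List String), S.Nodup →
      rows.filter (fun r => (PySem.Set.ofList S).contains (pvGet r k))
        = rows.filter (fun r => decide (pvGet r k ∈ S)) := by
    intro S hS
    apply List.filter_congr
    intro r _
    rw [PySem.Set.ofList_eq_self_of_nodup _ hS, Bool.eq_iff_iff]
    simp
  rw [hAside _ (hnd.sublist (List.take_sublist cut u)),
      hAside _ (hnd.sublist (List.drop_sublist cut u))]
  exact Prod.ext
    (pvGroupHalf rows k (u.take cut) (hnd.sublist (List.take_sublist cut u))).symm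
    (pvGroupHalf rows k (u.drop cut) (hnd.sublist (List.drop_sublist cut u))).symm

-- A's 'if validation_dates:' guard is always true when there are ≥ 2 unique values
theorem pvDropNonempty (u : List String) (h2 : 2 ≤ u.length) (hp : u.Pairwise (· < ·)) :
    PySem.Set.ofList (u.drop (max 1 (u.length * 4 / 5))) ≠ [] := by
  have hilt : max 1 (u.length * 4 / 5) < u.length := by
    have : u.length * 4 / 5 < u.length := Nat.div_lt_iff_lt_mul (by omega) |>.mpr (by omega)
    omega
  rw [PySem.Set.ofList_eq_self_of_nodup _ (hp.nodup.sublist (List.drop_sublist _ u))]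
  simp [List.drop_eq_nil_iff]
  omega

-- B's size test sees the same count of unique values as A's length test
theorem pvSizeEq (rows : List (List (String × String))) (k : String) :
    ((PySem.List.enumerate rows).foldl (fun d p => d.modify (pvGet p.2 k) [] (· ++ [p.1])) PySem.Dict.empty).size
      = (PySem.List.sorted (PySem.Set.ofList (rows.map (fun r => pvGet r k))) (fun x => x) false).length := by
  rw [PySem.List.length_sorted]
  have : ∀ (d : PySem.Dict String (List Int)), d.size = d.keys.length := by
    intro d; simp [PySem.Dict.size, PySem.Dict.keys]
  rw [this, pvGroupsKeys]

-- ===== VERDICT (by name: the statement is the Claim_ definition above) =====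
theorem split_rows_for_policy_selection_py_spec : Claim_equal_split_rows_for_policy_selection_py := by
  intro rows _ _
  unfold Spec_split_rows_for_policy_selection_py
  simp only [split_rows_for_policy_selection_py, split_rows_for_policy_selection_py_alt,
    pvTryKeysB, pvRaceSplitA, pvSizeEq, pvGroupsKeys]
  by_cases hd : 2 ≤ (PySem.List.sorted (PySem.Set.ofList (rows.map (fun r => pvGet r "date"))) (fun x => x) false).length
  · have hd' : ¬ ((PySem.List.sorted (PySem.Set.ofList (rows.map (fun r => pvGet r "date"))) (fun x => x) false).length < 2) := by omega
    have hne := pvDropNonempty _ hd (PySem.List.sorted_ofList_pairwise_lt (rows.map (fun r => pvGet r "date")))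
    rw [if_pos hd, if_pos hne, if_neg hd']
    exact pvSplitKey rows "date"
  · have hd' : (PySem.List.sorted (PySem.Set.ofList (rows.map (fun r => pvGet r "date"))) (fun x => x) false).length < 2 := by omega
    rw [if_neg hd, if_pos hd']
    by_cases hr : (PySem.List.sorted (PySem.Set.ofList (rows.map (fun r => pvGet r "race_key"))) (fun x => x) false).length < 2
    · rw [if_pos hr, if_pos hr]
    · rw [if_neg hr, if_neg hr]
      exact pvSplitKey rows "race_key"
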